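-- pv_equiv track=rewrite | github.com/pedrogmonteiro/cprojects | python_project/jogo_mnk/jogo_mnk.py | obtem_valor
-- ===== SOURCE A (Python) =====
-- def obtem_valor(tab, pos): #2.1.4
--     """
--     obtem valor: tabuleiro * posicao → inteiro
--     Retorna o valor da posição especificada no tabuleiro. A posição é
--     comparada com a posição no tabuleiro.
--
--     Parâmetros:
--     tab (tuple): Tabuleiro representado por um tuplo de tuplos.
--     pos (int): Posição no tabuleiro.
--     """
--
--     s = 0
--     for i in range(len(tab)):
--         for j in range(len(tab[i])):
--             if pos == (((j + 1))+(s)): #verifica se está na posição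
--                 return tab[i][j]
--         s += len(tab[i])
--     return s
-- ===== SOURCE B (Python) =====
-- def obtem_valor(tab, pos):
--     s = 0
--     for row in tab:
--         r = pos - s
--         if 1 <= r <= len(row):
--             return row[r - 1]
--         s += len(row)
--     return s
-- ===== Notes on version B (the rewrite author's own statement) =====
-- stated objective: faster
-- what changed: B replaces the inner column scan with a per-row offset range check and direct indexing, visiting one row at a time instead of every cell.
import Mathlib
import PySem

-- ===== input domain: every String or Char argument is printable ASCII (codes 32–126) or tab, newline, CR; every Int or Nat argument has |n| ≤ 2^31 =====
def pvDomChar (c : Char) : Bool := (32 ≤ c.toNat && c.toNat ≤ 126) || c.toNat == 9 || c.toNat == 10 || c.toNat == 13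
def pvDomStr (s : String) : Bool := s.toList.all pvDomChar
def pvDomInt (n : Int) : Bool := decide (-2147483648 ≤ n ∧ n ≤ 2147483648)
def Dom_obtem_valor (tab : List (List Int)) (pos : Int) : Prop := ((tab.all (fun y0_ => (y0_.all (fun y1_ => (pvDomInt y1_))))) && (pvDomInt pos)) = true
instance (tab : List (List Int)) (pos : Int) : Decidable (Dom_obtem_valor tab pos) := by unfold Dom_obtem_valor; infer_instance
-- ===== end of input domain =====

-- B replaces A's inner column scan with a per-row offset range check and direct indexing (objective: faster).
-- ===== PORT A =====
-- inner loop of A: scans row columns with j index, s the running offset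
def pvInnerA (row : List Int) (pos s j : Int) : Option Int :=
  match row with
  | [] => none
  | x :: rest => if pos = (j + 1) + s then some x else pvInnerA rest pos s (j + 1)

def pvOuterA (tab : List (List Int)) (pos s : Int) : Int :=
  match tab with
  | [] => s
  | row :: rest =>
    match pvInnerA row pos s 0 with
    | some v => v
    | none => pvOuterA rest pos (s + row.length)

def obtem_valor (tab : List (List Int)) (pos : Int) : Int := pvOuterA tab pos 0

-- ===== PORT B =====
-- B: per-row offset range check, then direct indexing (index proven in range by the
-- guard, so getD is exact for Python's row[r-1])
def pvOuterB (tab : List (List Int)) (pos s : Int) : Int :=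
  match tab with
  | [] => s
  | row :: rest =>
    if 1 ≤ pos - s ∧ pos - s ≤ (row.length : Int) then
      row.getD (pos - s - 1).toNat 0
    else pvOuterB rest pos (s + row.length)

def obtem_valor_alt (tab : List (List Int)) (pos : Int) : Int := pvOuterB tab pos 0

-- ===== PRECONDITION & SPEC =====
def Spec_obtem_valor (tab : List (List Int)) (pos : Int) (out : Int) : Prop := out = obtem_valor_alt tab pos
instance (tab : List (List Int)) (pos : Int) (out : Int) : Decidable (Spec_obtem_valor tab pos out) := by unfold Spec_obtem_valor; infer_instance

-- ===== CLAIM (what is proved, stated in full; the proofs are below) =====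
def Claim_equal_obtem_valor : Prop := ∀ (tab : List (List Int)) (pos : Int), Dom_obtem_valor tab pos → Spec_obtem_valor tab pos (obtem_valor tab pos)

-- ===== LEMMAS AND PROOFS =====
lemma pvInnerA_eq (row : List Int) : ∀ (pos s j : Int),
    pvInnerA row pos s j =
      if 1 ≤ pos - s - j ∧ pos - s - j ≤ (row.length : Int)
      then some (row.getD (pos - s - j - 1).toNat 0) else none := by
  induction row with
  | nil =>
    intro pos s j
    have hc : ¬ (1 ≤ pos - s - j ∧ pos - s - j ≤ (([] : List Int).length : Int)) := by
      simp; omega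
    simp only [pvInnerA, if_neg hc]
  | cons x rest ih =>
    intro pos s j
    have hlen : (((x :: rest).length : Int)) = (rest.length : Int) + 1 := by
      simp
    simp only [pvInnerA]
    by_cases h : pos = (j + 1) + s
    · have hc : 1 ≤ pos - s - j ∧ pos - s - j ≤ ((x :: rest).length : Int) := by
        rw [hlen]; omega
      have hz : (pos - s - j - 1).toNat = 0 := by omega
      rw [if_pos h, if_pos hc, hz]
      rfl
    · rw [if_neg h, ih pos s (j + 1)]
      by_cases hc : 1 ≤ pos - s - (j + 1) ∧ pos - s - (j + 1) ≤ (rest.length : Int)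
      · have hc' : 1 ≤ pos - s - j ∧ pos - s - j ≤ ((x :: rest).length : Int) := by
          rw [hlen]; omega
        have hn : (pos - s - j - 1).toNat = (pos - s - (j + 1) - 1).toNat + 1 := by omega
        rw [if_pos hc, if_pos hc', hn]
        rfl
      · have hc' : ¬ (1 ≤ pos - s - j ∧ pos - s - j ≤ ((x :: rest).length : Int)) := by
          rw [hlen]; intro h1; exact absurd ⟨by omega, by omega⟩ hc
        rw [if_neg hc, if_neg hc']

lemma pvOuter_eq (tab : List (List Int)) : ∀ (pos s : Int),
    pvOuterB tab pos s = pvOuterA tab pos s := by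
  induction tab with
  | nil => intro pos s; rfl
  | cons row rest ih =>
    intro pos s
    have h0 : pos - s - 0 = pos - s := by ring
    simp only [pvOuterA, pvOuterB, pvInnerA_eq, h0]
    by_cases hc : 1 ≤ pos - s ∧ pos - s ≤ ((row.length : Int))
    · rw [if_pos hc, if_pos hc]
    · rw [if_neg hc, if_neg hc, ih]

-- ===== VERDICT (by name: the statement is the Claim_ definition above) =====
theorem obtem_valor_spec : Claim_equal_obtem_valor := by
  intro tab pos _
  unfold Spec_obtem_valor obtem_valor obtem_valor_alt
  exact (pvOuter_eq tab pos 0).symm
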